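-- pv_equiv track=rewrite | github.com/wzygxr/shuati | class173_SqrtDecompositionAndMoAlgorithm/Code33_CowModCount.py | cow_mod_count
-- ===== SOURCE A (Python) =====
-- MOD = 1000000007
--
-- def cow_mod_count(n):
--     """
--     计算k*m之和，其中n = p*k + m (0 ≤ m < p)
--     使用整数分块优化，时间复杂度O(√n)
--     """
--     ans = 0
--     i = 1
--
--     while i <= n:
--         # 计算当前块的右端点
--         k = n // i
--         j = n // k
--
--         # 计算k*n*(j-i+1) mod MOD
--         term1 = (k % MOD) * (n % MOD) % MOD
--         term1 = term1 * ((j - i + 1) % MOD) % MOD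
--
--         # 计算k² * sum(p from i to j) mod MOD
--         # sum(p from i to j) = (i + j) * (j - i + 1) // 2
--         sum_p = ((i % MOD) + (j % MOD)) % MOD
--         sum_p = sum_p * ((j - i + 1) % MOD) % MOD
--         # 乘以2的逆元mod MOD
--         sum_p = sum_p * 500000004 % MOD  # 2^(-1) mod 1e9+7 = 500000004
--
--         term2 = (k % MOD) * (k % MOD) % MOD
--         term2 = term2 * sum_p % MOD
--
--         # 当前块的贡献是 (term1 - term2) mod MOD
--         ans = (ans + term1 - term2 + MOD) % MOD  # +MOD确保结果非负
--
--         # 移动到下一个块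
--         i = j + 1
--
--     return ans
-- ===== SOURCE B (Python) =====
-- MOD = 1000000007
--
-- def cow_mod_count(n):
--     if n <= 0:
--         return 0
--     # s = floor(sqrt(n))
--     s = 0
--     while (s + 1) * (s + 1) <= n:
--         s += 1
--     ans = 0
--     # small divisors p = 1..s: add each term directly
--     for p in range(1, s + 1):
--         ans = (ans + (n // p) * (n % p)) % MOD
--     # large divisors p > s, grouped by the quotient k = n // p (k ranges over 1..n//(s+1));
--     # for a fixed k the p with n//p == k form the interval (n//(k+1), n//k]
--     for k in range(1, n // (s + 1) + 1):
--         lo = max(s + 1, n // (k + 1) + 1)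
--         hi = n // k
--         if lo <= hi:
--             cnt = hi - lo + 1
--             tri = (lo + hi) * cnt // 2
--             ans = (ans + k * n * cnt - k * k * tri) % MOD
--     return ans
-- ===== Notes on version B (the rewrite author's own statement) =====
-- stated objective: alternative
-- what changed: Replaces A's block-jumping over positions with the modular inverse-of-2 trick by a sqrt-split: a direct per-term loop for small p plus a loop over quotient values k whose interval of positions is summed with an exact integer triangular number, with no modular inverse.
import Mathlib
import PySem

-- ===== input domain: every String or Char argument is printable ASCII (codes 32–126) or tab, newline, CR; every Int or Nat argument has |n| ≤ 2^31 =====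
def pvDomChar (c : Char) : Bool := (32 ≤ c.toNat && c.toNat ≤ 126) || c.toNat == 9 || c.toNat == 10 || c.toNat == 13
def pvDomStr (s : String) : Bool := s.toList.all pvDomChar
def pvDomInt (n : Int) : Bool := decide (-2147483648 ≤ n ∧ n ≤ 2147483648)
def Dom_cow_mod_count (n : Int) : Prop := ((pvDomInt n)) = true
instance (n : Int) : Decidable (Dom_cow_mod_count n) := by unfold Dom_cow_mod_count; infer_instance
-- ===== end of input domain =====

-- B replaces A's block-jumping over positions (i -> n//(n//i)+1, modular inverse of 2) by a
-- sqrt-split: direct terms for p ≤ √n plus a loop over quotient values k with exact triangular sums.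

def pvMOD : Int := 1000000007

-- ===== PORT A =====
-- A's while loop, ported as fuel recursion; each iteration moves i to n//(n//i)+1 > i, so the
-- n.toNat + 1 fuel supplied by cow_mod_count is never exhausted (the invariant lemma below shows this).
def cowLoopA (n : Int) : Nat → Int → Int → Int
  | 0, _, ans => ans
  | fuel+1, i, ans =>
    if i ≤ n then
      let k := PySem.Int.floordiv n i
      let j := PySem.Int.floordiv n k
      let term1a := PySem.Int.mod ((PySem.Int.mod k pvMOD) * (PySem.Int.mod n pvMOD)) pvMOD
      let term1 := PySem.Int.mod (term1a * (PySem.Int.mod (j - i + 1) pvMOD)) pvMOD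
      let sum_pa := PySem.Int.mod ((PySem.Int.mod i pvMOD) + (PySem.Int.mod j pvMOD)) pvMOD
      let sum_pb := PySem.Int.mod (sum_pa * (PySem.Int.mod (j - i + 1) pvMOD)) pvMOD
      let sum_p := PySem.Int.mod (sum_pb * 500000004) pvMOD
      let term2a := PySem.Int.mod ((PySem.Int.mod k pvMOD) * (PySem.Int.mod k pvMOD)) pvMOD
      let term2 := PySem.Int.mod (term2a * sum_p) pvMOD
      cowLoopA n fuel (j + 1) (PySem.Int.mod (ans + term1 - term2 + pvMOD) pvMOD)
    else ans

def cow_mod_count (n : Int) : Int := cowLoopA n (n.toNat + 1) 1 0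

-- ===== PORT B =====
-- B's while loop computing s = floor(sqrt(n)); fuel recursion, s grows by 1 while (s+1)^2 ≤ n,
-- so the n.toNat + 1 fuel supplied below is never exhausted (shown in the sqrt lemma).
def pvSqrtLoop (n : Int) : Nat → Int → Int
  | 0, s => s
  | fuel+1, s => if (s + 1) * (s + 1) ≤ n then pvSqrtLoop n fuel (s + 1) else s

def cow_mod_count_alt (n : Int) : Int :=
  if n ≤ 0 then 0
  else
    let s := pvSqrtLoop n (n.toNat + 1) 0
    let ans1 := (PySem.List.pyRange 1 (s + 1) 1).foldl
      (fun ans p =>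
        PySem.Int.mod (ans + (PySem.Int.floordiv n p) * (PySem.Int.mod n p)) pvMOD) 0
    (PySem.List.pyRange 1 (PySem.Int.floordiv n (s + 1) + 1) 1).foldl
      (fun ans k =>
        let lo := max (s + 1) (PySem.Int.floordiv n (k + 1) + 1)
        let hi := PySem.Int.floordiv n k
        if lo ≤ hi then
          let cnt := hi - lo + 1
          let tri := PySem.Int.floordiv ((lo + hi) * cnt) 2
          PySem.Int.mod (ans + k * n * cnt - k * k * tri) pvMOD
        else ans) ans1

-- ===== PRECONDITION & SPEC =====
def Spec_cow_mod_count (n : Int) (out : Int) : Prop := out = cow_mod_count_alt n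
instance (n : Int) (out : Int) : Decidable (Spec_cow_mod_count n out) := by unfold Spec_cow_mod_count; infer_instance

-- ===== CLAIM (what is proved, stated in full; the proofs are below) =====
def Claim_equal_cow_mod_count : Prop := ∀ (n : Int), Dom_cow_mod_count n → Spec_cow_mod_count n (cow_mod_count n)

-- ===== LEMMAS AND PROOFS =====

-- Mathematical sum: pvS n i c = Σ_{t<c} (n / (i+t)) * (n % (i+t))  (ediv/emod; divisors are positive where used)
def pvS (n : Int) (i : Int) : Nat → Int
  | 0 => 0
  | c+1 => (n / i) * (n % i) + pvS n (i+1) c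

-- Triangular sum pvT i c = Σ_{t<c} (i+t)
def pvT (i : Int) : Nat → Int
  | 0 => 0
  | c+1 => i + pvT (i+1) c

theorem pvMOD_pos : (0:Int) < pvMOD := by decide

theorem pvS_add (n : Int) : ∀ (a b : Nat) (i : Int),
    pvS n i (a + b) = pvS n i a + pvS n (i + a) b := by
  intro a
  induction a with
  | zero => intro b i; simp [pvS]
  | succ a ih =>
    intro b i
    have h1 : a + 1 + b = (a + b) + 1 := by omega
    rw [h1]
    simp only [pvS]
    rw [ih b (i+1)]
    have h2 : i + 1 + (a:Int) = i + ((a:Int) + 1) := by ring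
    rw [h2]
    push_cast
    ring

theorem pvT_closed : ∀ (c : Nat) (i : Int), 2 * pvT i c = (2 * i + c - 1) * c := by
  intro c
  induction c with
  | zero => intro i; simp [pvT]
  | succ c ih =>
    intro i
    simp only [pvT, mul_add, ih (i+1)]
    push_cast
    ring

-- On a block where the quotient is constantly k, the sum has the closed form k*n*c - k*k*T
theorem pvS_block (n k : Int) : ∀ (c : Nat) (i : Int),
    (∀ p : Int, i ≤ p → p < i + c → n / p = k) →
    pvS n i c = k * n * c - k * k * pvT i c := by
  intro c
  induction c with
  | zero => intro i _; simp [pvS, pvT]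
  | succ c ih =>
    intro i h
    have hi : n / i = k := h i le_rfl (by omega)
    have hmod : n % i = n - i * k := by rw [Int.emod_def, hi]
    have hrest : pvS n (i+1) c = k * n * c - k * k * pvT (i+1) c := by
      apply ih
      intro p hp1 hp2
      apply h p (by omega) (by push_cast at hp2 ⊢; omega)
    simp only [pvS, pvT, hi, hmod, hrest]
    push_cast
    ring

-- a % M ≡ a
theorem pvModEq_self (a : Int) : a % pvMOD ≡ a [ZMOD pvMOD] :=
  Int.emod_emod_of_dvd a dvd_rfl

theorem pvK_pos (n i : Int) (hi : 0 < i) (hin : i ≤ n) : 1 ≤ n / i := by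
  rw [Int.le_ediv_iff_mul_le hi]; omega

theorem pvDiv_mul_le (n i : Int) (hi : 0 < i) (hn : 0 ≤ n) : i * (n / i) ≤ n := by
  have h2 := Int.emod_def n i
  have h3 := Int.emod_nonneg n (by omega : i ≠ 0)
  omega

theorem pvJ_ge (n i : Int) (hi : 0 < i) (hin : i ≤ n) : i ≤ n / (n / i) := by
  have hk := pvK_pos n i hi hin
  rw [Int.le_ediv_iff_mul_le (by omega : (0:Int) < n / i)]
  have h1 : i * (n / i) ≤ n := pvDiv_mul_le n i hi (by omega)
  omega

theorem pvJ_le (n i : Int) (hi : 0 < i) (hin : i ≤ n) : n / (n / i) ≤ n :=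
  Int.ediv_le_self _ (by omega)

theorem pvQuot_const (n i p : Int) (hi : 0 < i) (hin : i ≤ n)
    (hp1 : i ≤ p) (hp2 : p ≤ n / (n / i)) : n / p = n / i := by
  have hk := pvK_pos n i hi hin
  have hp0 : 0 < p := by omega
  apply le_antisymm
  · have h1 : n < (n / i + 1) * i := Int.lt_ediv_add_one_mul_self n hi
    have h2 : (n / i + 1) * i ≤ (n / i + 1) * p := by nlinarith
    have := (Int.ediv_lt_iff_lt_mul hp0).mpr (by omega : n < (n / i + 1) * p)
    omega
  · rw [Int.le_ediv_iff_mul_le hp0]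
    have := (Int.le_ediv_iff_mul_le (by omega : (0:Int) < n / i)).mp hp2
    nlinarith

-- n/p = k exactly on the interval (n/(k+1), n/k]
theorem pvQuot_interval (n k p : Int) (hn : 0 ≤ n) (hk : 1 ≤ k) (hp0 : 0 < p)
    (h1 : n / (k + 1) < p) (h2 : p ≤ n / k) : n / p = k := by
  apply le_antisymm
  · by_contra hcon
    have hge : k + 1 ≤ n / p := by omega
    have := (Int.le_ediv_iff_mul_le hp0).mp hge
    have : p ≤ n / (k + 1) := by
      rw [Int.le_ediv_iff_mul_le (by omega : (0:Int) < k + 1)]; nlinarith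
    omega
  · rw [Int.le_ediv_iff_mul_le hp0]
    have := (Int.le_ediv_iff_mul_le (by omega : (0:Int) < k)).mp h2
    nlinarith

-- quotient is antitone in the divisor
theorem pvDiv_antitone (n a b : Int) (hn : 0 ≤ n) (ha : 0 < a) (hab : a ≤ b) : n / b ≤ n / a := by
  rw [Int.le_ediv_iff_mul_le ha]
  have h1 : 0 ≤ n / b := Int.ediv_nonneg hn (by omega)
  have h2 : b * (n / b) ≤ n := pvDiv_mul_le n b (by omega) hn
  nlinarith

-- A's loop invariant: starting at i with a reduced accumulator, the loop returns
-- (ans + Σ_{p=i}^{n} (n/p)*(n%p)) % MOD, provided fuel covers the remaining positions.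
theorem cowLoopA_inv (n : Int) : ∀ (fuel : Nat) (i ans : Int),
    0 < i → 0 ≤ ans → ans < pvMOD → (n + 1 - i).toNat ≤ fuel →
    cowLoopA n fuel i ans = (ans + pvS n i ((n + 1 - i).toNat)) % pvMOD := by
  intro fuel
  induction fuel with
  | zero =>
    intro i ans hi h0 h1 hf
    have hc : (n + 1 - i).toNat = 0 := by omega
    rw [hc]
    simp [cowLoopA, pvS, Int.emod_eq_of_lt h0 h1]
  | succ fuel ih =>
    intro i ans hi h0 h1 hf
    by_cases hin : i ≤ n
    · have hk1 : 1 ≤ n / i := pvK_pos n i hi hin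
      have hfd1 : PySem.Int.floordiv n i = n / i := PySem.Int.floordiv_eq_ediv_of_pos hi
      have hfd2 : PySem.Int.floordiv n (n / i) = n / (n / i) :=
        PySem.Int.floordiv_eq_ediv_of_pos (by omega)
      have hmodM : ∀ a : Int, PySem.Int.mod a pvMOD = a % pvMOD :=
        fun a => PySem.Int.mod_eq_emod_of_pos pvMOD_pos
      have hij : i ≤ n / (n / i) := pvJ_ge n i hi hin
      have hjn : n / (n / i) ≤ n := pvJ_le n i hi hin
      simp only [cowLoopA, if_pos hin, hfd1, hfd2, hmodM]
      set k := n / i with hkdef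
      set j := n / (n / i) with hjdef
      set A' := (ans + ((k % pvMOD) * (n % pvMOD) % pvMOD * ((j - i + 1) % pvMOD) % pvMOD) -
          ((k % pvMOD) * (k % pvMOD) % pvMOD *
            (((i % pvMOD) + (j % pvMOD)) % pvMOD * ((j - i + 1) % pvMOD) % pvMOD * 500000004 % pvMOD) % pvMOD) +
          pvMOD) % pvMOD with hA'def
      have hA0 : 0 ≤ A' := Int.emod_nonneg _ (by decide)
      have hA1 : A' < pvMOD := Int.emod_lt_of_pos _ pvMOD_pos
      have hfuel : (n + 1 - (j + 1)).toNat ≤ fuel := by omega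
      rw [ih (j + 1) A' (by omega) hA0 hA1 hfuel]
      -- split the sum at the end of the block
      set c₁ := (j - i + 1).toNat with hc₁
      have hcast : (c₁ : Int) = j - i + 1 := by omega
      have hc0 : (n + 1 - i).toNat = c₁ + (n + 1 - (j + 1)).toNat := by omega
      have hi_c1 : i + (c₁ : Int) = j + 1 := by omega
      rw [hc0, pvS_add n c₁ _ i, hi_c1]
      set S2 := pvS n (j + 1) ((n + 1 - (j + 1)).toNat) with hS2
      -- block closed form
      have hblk : ∀ p : Int, i ≤ p → p < i + (c₁ : Int) → n / p = k := by
        intro p hp1 hp2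
        exact pvQuot_const n i p hi hin hp1 (by omega)
      have hS1 : pvS n i c₁ = k * n * (j - i + 1) - k * k * pvT i c₁ := by
        rw [pvS_block n k c₁ i hblk, hcast]
      -- modular congruences
      have hM0 : (pvMOD : Int) ≡ 0 [ZMOD pvMOD] := by decide
      have hinv2 : (1000000008 : Int) ≡ 1 [ZMOD pvMOD] := by decide
      have e3 : (k % pvMOD) * (n % pvMOD) % pvMOD * ((j - i + 1) % pvMOD) % pvMOD
          ≡ k * n * (j - i + 1) [ZMOD pvMOD] :=
        (pvModEq_self _).trans
          (Int.ModEq.mul ((pvModEq_self _).trans ((pvModEq_self k).mul (pvModEq_self n)))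
            (pvModEq_self _))
      have hT : (i + j) * (j - i + 1) = 2 * pvT i c₁ := by
        rw [pvT_closed c₁ i, hcast]; ring
      have esp : ((i % pvMOD) + (j % pvMOD)) % pvMOD * ((j - i + 1) % pvMOD) % pvMOD * 500000004 % pvMOD
          ≡ pvT i c₁ [ZMOD pvMOD] := by
        calc ((i % pvMOD) + (j % pvMOD)) % pvMOD * ((j - i + 1) % pvMOD) % pvMOD * 500000004 % pvMOD
            ≡ ((i % pvMOD) + (j % pvMOD)) % pvMOD * ((j - i + 1) % pvMOD) % pvMOD * 500000004 [ZMOD pvMOD] :=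
              pvModEq_self _
          _ ≡ (i + j) * (j - i + 1) * 500000004 [ZMOD pvMOD] :=
              Int.ModEq.mul
                ((pvModEq_self _).trans
                  (Int.ModEq.mul
                    ((pvModEq_self _).trans ((pvModEq_self i).add (pvModEq_self j)))
                    (pvModEq_self _)))
                (Int.ModEq.refl _)
          _ = pvT i c₁ * 1000000008 := by rw [hT]; ring
          _ ≡ pvT i c₁ * 1 [ZMOD pvMOD] := (Int.ModEq.refl _).mul hinv2
          _ = pvT i c₁ := mul_one _
      have eT2 : (k % pvMOD) * (k % pvMOD) % pvMOD *
          (((i % pvMOD) + (j % pvMOD)) % pvMOD * ((j - i + 1) % pvMOD) % pvMOD * 500000004 % pvMOD) % pvMOD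
          ≡ k * k * pvT i c₁ [ZMOD pvMOD] :=
        (pvModEq_self _).trans
          (Int.ModEq.mul ((pvModEq_self _).trans ((pvModEq_self k).mul (pvModEq_self k))) esp)
      have hA'cong : A' ≡ ans + pvS n i c₁ [ZMOD pvMOD] := by
        calc A' ≡ ans + ((k % pvMOD) * (n % pvMOD) % pvMOD * ((j - i + 1) % pvMOD) % pvMOD) -
              ((k % pvMOD) * (k % pvMOD) % pvMOD *
                (((i % pvMOD) + (j % pvMOD)) % pvMOD * ((j - i + 1) % pvMOD) % pvMOD * 500000004 % pvMOD) % pvMOD) +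
              pvMOD [ZMOD pvMOD] := by rw [hA'def]; exact pvModEq_self _
          _ ≡ ans + k * n * (j - i + 1) - k * k * pvT i c₁ + 0 [ZMOD pvMOD] :=
              Int.ModEq.add (Int.ModEq.sub ((Int.ModEq.refl ans).add e3) eT2) hM0
          _ = ans + pvS n i c₁ := by rw [hS1]; ring
      rw [← add_assoc]
      exact hA'cong.add_right S2
    · have hc : (n + 1 - i).toNat = 0 := by omega
      rw [hc]
      simp [cowLoopA, hin, pvS, Int.emod_eq_of_lt h0 h1]

-- the sqrt loop computes the integer square root
theorem pvSqrtLoop_spec (n : Int) (hn : 1 ≤ n) : ∀ (fuel : Nat) (s : Int),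
    0 ≤ s → s * s ≤ n → (n - s).toNat ≤ fuel →
    0 ≤ pvSqrtLoop n fuel s ∧ pvSqrtLoop n fuel s * pvSqrtLoop n fuel s ≤ n ∧
      n < (pvSqrtLoop n fuel s + 1) * (pvSqrtLoop n fuel s + 1) := by
  intro fuel
  induction fuel with
  | zero =>
    intro s h0 h1 hf
    have hsn : n ≤ s := by omega
    simp only [pvSqrtLoop]
    refine ⟨h0, h1, ?_⟩
    nlinarith
  | succ fuel ih =>
    intro s h0 h1 hf
    simp only [pvSqrtLoop]
    by_cases h : (s + 1) * (s + 1) ≤ n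
    · rw [if_pos h]
      have hs1n : s + 1 ≤ n := by nlinarith
      exact ih (s + 1) (by omega) h (by omega)
    · rw [if_neg h]
      exact ⟨h0, h1, by omega⟩

-- B's first loop: direct terms for p = i .. i+c-1
theorem pvLoop1_inv (n : Int) : ∀ (c : Nat) (i ans : Int),
    0 < i → 0 ≤ ans → ans < pvMOD →
    (PySem.List.pyRange i (i + c) 1).foldl
      (fun ans p =>
        PySem.Int.mod (ans + (PySem.Int.floordiv n p) * (PySem.Int.mod n p)) pvMOD)
      ans = (ans + pvS n i c) % pvMOD := by
  intro c
  induction c with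
  | zero =>
    intro i ans hi h0 h1
    rw [PySem.List.pyRange_one_eq_nil (by omega)]
    simp [pvS, Int.emod_eq_of_lt h0 h1]
  | succ c ih =>
    intro i ans hi h0 h1
    rw [PySem.List.pyRange_one_cons (by omega : i < i + ((c:Nat)+1:Nat))]
    simp only [List.foldl_cons]
    rw [PySem.Int.floordiv_eq_ediv_of_pos hi, PySem.Int.mod_eq_emod_of_pos hi,
        PySem.Int.mod_eq_emod_of_pos pvMOD_pos]
    set a' := (ans + (n / i) * (n % i)) % pvMOD with ha'
    have h2 : i + ((c : Nat) + 1 : Nat) = (i + 1) + (c : Nat) := by push_cast; ring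
    rw [h2, ih (i + 1) a' (by omega) (Int.emod_nonneg _ (by decide)) (Int.emod_lt_of_pos _ pvMOD_pos)]
    have hcong : a' ≡ ans + (n / i) * (n % i) [ZMOD pvMOD] := pvModEq_self _
    have hS : pvS n i (c + 1) = (n / i) * (n % i) + pvS n (i + 1) c := rfl
    rw [hS, ← add_assoc]
    exact hcong.add_right _

-- B's second loop: quotient values t .. K cover exactly the positions p ∈ (s, n/t]
theorem pvLoop2_inv (n s : Int) (hn : 1 ≤ n) (hs1 : 1 ≤ s) :
    ∀ (c : Nat) (t ans : Int), 1 ≤ t → t + (c : Int) = n / (s + 1) + 1 →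
    0 ≤ ans → ans < pvMOD →
    (PySem.List.pyRange t (t + c) 1).foldl
      (fun ans k =>
        let lo := max (s + 1) (PySem.Int.floordiv n (k + 1) + 1)
        let hi := PySem.Int.floordiv n k
        if lo ≤ hi then
          let cnt := hi - lo + 1
          let tri := PySem.Int.floordiv ((lo + hi) * cnt) 2
          PySem.Int.mod (ans + k * n * cnt - k * k * tri) pvMOD
        else ans) ans
    = (ans + pvS n (s + 1) ((n / t - s).toNat)) % pvMOD := by
  intro c
  induction c with
  | zero =>
    intro t ans ht hK h0 h1
    rw [PySem.List.pyRange_one_eq_nil (by omega)]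
    -- t = K+1; the remaining positions (s, n/t] are empty since n/(K+1) ≤ s
    have hts : n / t ≤ s := by
      by_contra hcon
      have hge : s + 1 ≤ n / t := by omega
      have h2 := (Int.le_ediv_iff_mul_le (by omega : (0:Int) < t)).mp hge
      have h3 : t ≤ n / (s + 1) := by
        rw [Int.le_ediv_iff_mul_le (by omega : (0:Int) < s + 1)]; nlinarith
      omega
    have hzero : (n / t - s).toNat = 0 := by omega
    rw [hzero]
    simp [pvS, Int.emod_eq_of_lt h0 h1]
  | succ c ih =>
    intro t ans ht hK h0 h1
    rw [PySem.List.pyRange_one_cons (by omega : t < t + ((c:Nat)+1:Nat))]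
    simp only [List.foldl_cons]
    have hfd_t : PySem.Int.floordiv n t = n / t := PySem.Int.floordiv_eq_ediv_of_pos (by omega)
    have hfd_t1 : PySem.Int.floordiv n (t + 1) = n / (t + 1) :=
      PySem.Int.floordiv_eq_ediv_of_pos (by omega)
    -- t ≤ K, so the interval ends at n/t ≥ s+1
    have htK : t ≤ n / (s + 1) := by omega
    have ht_mul : t * (s + 1) ≤ n := (Int.le_ediv_iff_mul_le (by omega : (0:Int) < s + 1)).mp htK
    have hhi_ge : s + 1 ≤ n / t := by
      rw [Int.le_ediv_iff_mul_le (by omega : (0:Int) < t)]; nlinarith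
    have hanti : n / (t + 1) ≤ n / t := pvDiv_antitone n t (t + 1) (by omega) (by omega) (by omega)
    have hdivpos : 0 ≤ n / (t + 1) := Int.ediv_nonneg (by omega) (by omega)
    have h2 : t + ((c : Nat) + 1 : Nat) = (t + 1) + (c : Nat) := by push_cast; ring
    rw [h2]
    set lo := max (s + 1) (n / (t + 1) + 1) with hlo
    set hi := n / t with hhi
    simp only [hfd_t, hfd_t1]
    by_cases hcase : lo ≤ hi
    · rw [if_pos hcase]
      set cnt := hi - lo + 1 with hcnt
      have hcnt_pos : 1 ≤ cnt := by omega
      have hlo_pos : s + 1 ≤ lo := by omega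
      set cN := cnt.toNat with hcN
      have hcNcast : (cN : Int) = cnt := by omega
      -- the exact triangular number is pvT lo cN
      have htri2 : (lo + hi) * cnt = 2 * pvT lo cN := by
        rw [pvT_closed cN lo, hcNcast]; ring
      have htri : PySem.Int.floordiv ((lo + hi) * cnt) 2 = pvT lo cN := by
        rw [PySem.Int.floordiv_eq_ediv_of_pos (by omega : (0:Int) < 2), htri2,
            Int.mul_ediv_cancel_left _ (by omega : (2:Int) ≠ 0)]
      rw [htri, PySem.Int.mod_eq_emod_of_pos pvMOD_pos]
      set a' := (ans + t * n * cnt - t * t * pvT lo cN) % pvMOD with ha'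
      rw [ih (t + 1) a' (by omega) (by push_cast at hK ⊢; omega)
          (Int.emod_nonneg _ (by decide)) (Int.emod_lt_of_pos _ pvMOD_pos)]
      -- block closed form: on [lo, hi] the quotient is constantly t
      have hblk : ∀ p : Int, lo ≤ p → p < lo + (cN : Int) → n / p = t := by
        intro p hp1 hp2
        exact pvQuot_interval n t p (by omega) ht (by omega) (by omega) (by omega)
      have hSb : pvS n lo cN = t * n * cnt - t * t * pvT lo cN := by
        rw [pvS_block n t cN lo hblk, hcNcast]
      -- split Σ_{p∈(s, n/t]} at lo
      have hsplit : (n / t - s).toNat = (lo - (s + 1)).toNat + cN := by omega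
      have hstep : (s + 1) + ((lo - (s + 1)).toNat : Int) = lo := by omega
      have hfirst : (lo - (s + 1)).toNat = (n / (t + 1) - s).toNat := by omega
      rw [hsplit, pvS_add n _ cN (s + 1), hstep, hfirst]
      have hcong : a' ≡ ans + pvS n lo cN [ZMOD pvMOD] := by
        calc a' ≡ ans + t * n * cnt - t * t * pvT lo cN [ZMOD pvMOD] := pvModEq_self _
          _ = ans + pvS n lo cN := by rw [hSb]; ring
      have hgoal : a' + pvS n (s + 1) ((n / (t + 1) - s).toNat)
          ≡ ans + (pvS n (s + 1) ((n / (t + 1) - s).toNat) + pvS n lo cN) [ZMOD pvMOD] := by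
        calc a' + pvS n (s + 1) ((n / (t + 1) - s).toNat)
            ≡ ans + pvS n lo cN + pvS n (s + 1) ((n / (t + 1) - s).toNat) [ZMOD pvMOD] :=
              hcong.add_right _
          _ = ans + (pvS n (s + 1) ((n / (t + 1) - s).toNat) + pvS n lo cN) := by ring
      exact hgoal
    · rw [if_neg hcase]
      -- empty interval: n/(t+1) = n/t, nothing to add for this k
      have heq : n / (t + 1) = n / t := by omega
      rw [ih (t + 1) ans (by omega) (by push_cast at hK ⊢; omega) h0 h1, heq]

-- ===== VERDICT (by name: the statement is the Claim_ definition above) =====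
theorem cow_mod_count_spec : Claim_equal_cow_mod_count := by
  intro n _
  show cow_mod_count n = cow_mod_count_alt n
  by_cases hn : n ≤ 0
  · simp only [cow_mod_count, cow_mod_count_alt, if_pos hn]
    rw [cowLoopA_inv n (n.toNat + 1) 1 0 (by omega) (by omega) (by decide) (by omega)]
    have h2 : (n + 1 - 1).toNat = 0 := by omega
    rw [h2]
    simp [pvS]
  · simp only [cow_mod_count, cow_mod_count_alt, if_neg hn]
    have hn1 : 1 ≤ n := by omega
    obtain ⟨hs0, hs2, hs3⟩ := pvSqrtLoop_spec n hn1 (n.toNat + 1) 0 (by omega) (by omega) (by omega)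
    set s := pvSqrtLoop n (n.toNat + 1) 0 with hsdef
    have hs1 : 1 ≤ s := by nlinarith
    have hsn : s ≤ n := by nlinarith
    have hKnn : 0 ≤ n / (s + 1) := Int.ediv_nonneg (by omega) (by omega)
    -- first loop
    have hre1 : PySem.List.pyRange 1 (s + 1) 1
        = PySem.List.pyRange 1 (1 + ((s.toNat : Nat) : Int)) 1 := by
      congr 1; omega
    have h1 : (PySem.List.pyRange 1 (s + 1) 1).foldl
        (fun ans p =>
          PySem.Int.mod (ans + (PySem.Int.floordiv n p) * (PySem.Int.mod n p)) pvMOD) 0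
        = (0 + pvS n 1 s.toNat) % pvMOD := by
      rw [hre1]
      exact pvLoop1_inv n s.toNat 1 0 (by omega) (by omega) (by decide)
    rw [h1]
    -- second loop
    have hre2 : PySem.List.pyRange 1 (PySem.Int.floordiv n (s + 1) + 1) 1
        = PySem.List.pyRange 1 (1 + (((n / (s + 1)).toNat : Nat) : Int)) 1 := by
      congr 1
      rw [PySem.Int.floordiv_eq_ediv_of_pos (by omega : (0:Int) < s + 1)]
      omega
    rw [hre2, pvLoop2_inv n s hn1 hs1 (n / (s + 1)).toNat 1 _ (by omega) (by omega)
        (Int.emod_nonneg _ (by decide)) (Int.emod_lt_of_pos _ pvMOD_pos)]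
    -- A side and combination
    rw [cowLoopA_inv n (n.toNat + 1) 1 0 (by omega) (by omega) (by decide) (by omega)]
    have hdiv1 : n / 1 = n := Int.ediv_one n
    rw [hdiv1]
    have hsum : pvS n 1 ((n + 1 - 1).toNat) = pvS n 1 s.toNat + pvS n (s + 1) ((n - s).toNat) := by
      have hc : (n + 1 - 1).toNat = s.toNat + (n - s).toNat := by omega
      rw [hc, pvS_add n s.toNat ((n - s).toNat) 1]
      have h3 : (1 : Int) + (s.toNat : Int) = s + 1 := by omega
      rw [h3]
    rw [hsum, Int.emod_add_emod]
    ring_nf
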